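-- pv_equiv track=rewrite | github.com/Nack34/TTPS---Tecnicas-y-Estrategias---2024 | src/Entregas/Entrega 2/10926 - How Many Dependencies/v1.py | dfs
-- ===== SOURCE A (Python) =====
-- def dfs(task, memo, graph):
--     if task in memo:
--         return memo[task]
--
--     count = 0
--     for dep in graph[task]:
--         count += 1 + dfs(dep, memo, graph)
--
--     memo[task] = count
--     return count
-- ===== SOURCE B (Python) =====
-- def dfs(task, memo, graph):
--     # Bottom-up fixed point: repeatedly finalize any node whose dependencies
--     # are all memoized, until nothing changes; then look the task up.
--     # (Return value matches A; the memo dict may gain entries for nodes A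
--     # never visits -- the equivalence is about the return value.)
--     changed = True
--     while changed:
--         changed = False
--         for node, deps in graph.items():
--             if node not in memo and all(d in memo for d in deps):
--                 memo[node] = sum(1 + memo[d] for d in deps)
--                 changed = True
--     return memo[task]
-- ===== Notes on version B (the rewrite author's own statement) =====
-- stated objective: alternative
-- what changed: Replaces A's top-down memoized recursion with a bottom-up fixed-point saturation: repeatedly finalize any graph node whose dependencies are all memoized, storing sum(1+memo[d]), until no change, then look the task up.
import Mathlib
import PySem

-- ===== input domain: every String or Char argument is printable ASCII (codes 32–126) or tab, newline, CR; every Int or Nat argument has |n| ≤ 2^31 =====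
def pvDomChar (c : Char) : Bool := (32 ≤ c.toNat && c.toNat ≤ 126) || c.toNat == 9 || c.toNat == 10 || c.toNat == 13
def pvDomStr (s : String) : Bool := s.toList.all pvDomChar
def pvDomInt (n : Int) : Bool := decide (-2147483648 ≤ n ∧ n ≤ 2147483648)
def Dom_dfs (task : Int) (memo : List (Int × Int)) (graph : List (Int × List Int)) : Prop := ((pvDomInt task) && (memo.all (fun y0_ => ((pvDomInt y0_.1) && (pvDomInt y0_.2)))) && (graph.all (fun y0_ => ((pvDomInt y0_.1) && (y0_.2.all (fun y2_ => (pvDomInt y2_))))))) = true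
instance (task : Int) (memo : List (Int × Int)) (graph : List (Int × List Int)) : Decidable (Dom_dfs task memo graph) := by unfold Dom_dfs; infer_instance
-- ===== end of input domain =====

-- B replaces A's top-down memoized recursion by a bottom-up fixed-point saturation over the
-- graph (objective: alternative); equivalence is about the RETURN value only — both mutate the
-- Python memo dict, but B may memoise nodes A never visits.


-- ===== PORT A =====
-- Python A is a recursive function that mutates the memo dict, so the port threads the dict
-- through; fuel (graph.length + 1 bounds the recursion depth whenever Python A returns) makes
-- it total, and `none` marks exactly the inputs where Python A raises (KeyError / RecursionError).
mutual
def dfsGo (graph : PySem.Dict Int (List Int)) : Nat → Int → PySem.Dict Int Int → Option (Int × PySem.Dict Int Int)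
  | 0, _, _ => none
  | f+1, t, m =>
    match m.get? t with
    | some v => some (v, m)                     -- if task in memo: return memo[task]
    | none =>
      match graph.get? t with
      | none => none                            -- graph[task]: KeyError
      | some ds =>
        match goDeps graph f ds 0 m with        -- for dep in graph[task]: count += 1 + dfs(dep, memo, graph)
        | none => none
        | some cm => some (cm.1, cm.2.insert t cm.1)   -- memo[task] = count; return count
termination_by f t m => (f, 0)
def goDeps (graph : PySem.Dict Int (List Int)) : Nat → List Int → Int → PySem.Dict Int Int → Option (Int × PySem.Dict Int Int)
  | _, [], c, m => some (c, m)
  | f, d :: ds, c, m =>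
    match dfsGo graph f d m with
    | none => none
    | some vm => goDeps graph f ds (c + (1 + vm.1)) vm.2
termination_by f ds c m => (f, ds.length + 1)
end

def dfs (task : Int) (memo : List (Int × Int)) (graph : List (Int × List Int)) : Int :=
  match dfsGo (PySem.Dict.mk graph) (graph.length + 1) task (PySem.Dict.mk memo) with
  | some vm => vm.1
  | none => 0

-- ===== PORT B =====
-- one body of B's inner `for node, deps in graph.items()` loop
def bStep (st : PySem.Dict Int Int × Bool) (kv : Int × List Int) : PySem.Dict Int Int × Bool :=
  if !st.1.contains kv.1 && kv.2.all (fun d => st.1.contains d) then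
    (st.1.insert kv.1 (kv.2.foldl (fun a d => a + (1 + st.1.getD d 0)) 0), true)
  else st

-- one iteration of B's `while changed` loop (changed reset to False at its top)
def onePass (graph : List (Int × List Int)) (m : PySem.Dict Int Int) : PySem.Dict Int Int × Bool :=
  graph.foldl bStep (m, false)

-- the `while changed` loop; each changed pass memoises a fresh graph key, so
-- graph.length + 1 passes always suffice (fuel is only a totality guard)
def loopGo (graph : List (Int × List Int)) : Nat → PySem.Dict Int Int → PySem.Dict Int Int
  | 0, m => m
  | f+1, m =>
    if (onePass graph m).2 then loopGo graph f (onePass graph m).1 else (onePass graph m).1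

def dfs_alt (task : Int) (memo : List (Int × Int)) (graph : List (Int × List Int)) : Int :=
  ((loopGo graph (graph.length + 1) (PySem.Dict.mk memo)).get? task).getD 0   -- return memo[task] (none = KeyError, excluded by Pre_)

-- ===== PRECONDITION & SPEC =====
-- helpers for Pre_: dependency successors of a not-yet-memoised node …
def activeSuccs (mD : PySem.Dict Int Int) (gD : PySem.Dict Int (List Int)) (y : Int) : List Int :=
  if mD.contains y then [] else (gD.get? y).getD []

-- … the set of nodes reachable from the start through not-yet-memoised nodes …
def reachFrom (mD : PySem.Dict Int Int) (gD : PySem.Dict Int (List Int)) : Nat → List Int → List Int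
  | 0, R => R
  | k+1, R => reachFrom mD gD k (PySem.Set.update R (R.flatMap (activeSuccs mD gD)))

def preReach (task : Int) (memo : List (Int × Int)) (graph : List (Int × List Int)) : List Int :=
  reachFrom (PySem.Dict.mk memo) (PySem.Dict.mk graph) (graph.length + 1) [task]

-- … and the k-truncated dependency height of a node (stabilises iff no reachable cycle)
def heightAt (mD : PySem.Dict Int Int) (gD : PySem.Dict Int (List Int)) : Nat → Int → Nat
  | 0, _ => 0
  | k+1, y =>
    if mD.contains y then 0 else
      match gD.get? y with
      | none => 0
      | some ds => ds.foldl (fun a d => max a (1 + heightAt mD gD k d)) 0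

-- Pre_ holds exactly where Python A returns: the task is already memoised, or (graph is a dict,
-- so its keys are distinct and) every node reachable through unmemoised nodes has a graph entry
-- (else A raises KeyError) and the reachable heights stabilise, i.e. no reachable cycle
-- (else A raises RecursionError).
def Pre_dfs (task : Int) (memo : List (Int × Int)) (graph : List (Int × List Int)) : Prop :=
  (PySem.Dict.mk memo).contains task = true ∨
  ((graph.map Prod.fst).Nodup ∧
   task ∈ preReach task memo graph ∧
   (∀ y ∈ preReach task memo graph, ∀ d ∈ activeSuccs (PySem.Dict.mk memo) (PySem.Dict.mk graph) y,
      d ∈ preReach task memo graph) ∧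
   (∀ y ∈ preReach task memo graph, (PySem.Dict.mk memo).contains y = false →
      ((PySem.Dict.mk graph).get? y).isSome = true) ∧
   (∀ y ∈ preReach task memo graph,
      heightAt (PySem.Dict.mk memo) (PySem.Dict.mk graph) graph.length y =
      heightAt (PySem.Dict.mk memo) (PySem.Dict.mk graph) (graph.length + 1) y))
instance (task : Int) (memo : List (Int × Int)) (graph : List (Int × List Int)) : Decidable (Pre_dfs task memo graph) := by unfold Pre_dfs; infer_instance

def pvWitness_dfs : Int × (List (Int × Int)) × (List (Int × List Int)) := (1, [], [(1, [2]), (2, [])])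

def Spec_dfs (task : Int) (memo : List (Int × Int)) (graph : List (Int × List Int)) (out : Int) : Prop := out = dfs_alt task memo graph
instance (task : Int) (memo : List (Int × Int)) (graph : List (Int × List Int)) (out : Int) : Decidable (Spec_dfs task memo graph out) := by unfold Spec_dfs; infer_instance

-- ===== CLAIM (what is proved, stated in full; the proofs are below) =====
def Claim_equal_dfs : Prop := ∀ (task : Int) (memo : List (Int × Int)) (graph : List (Int × List Int)), Dom_dfs task memo graph → Pre_dfs task memo graph → Spec_dfs task memo graph (dfs task memo graph)

-- ===== LEMMAS AND PROOFS =====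

-- values already stored are preserved (the dicts only ever gain fresh keys)
def DPreserve (m M : PySem.Dict Int Int) : Prop := ∀ k v, m.get? k = some v → M.get? k = some v
-- key containment is monotone
def CMono (m m' : PySem.Dict Int Int) : Prop := ∀ k, m.contains k = true → m'.contains k = true
-- the value B's equations assign to a dependency list, read off a dict
def sumW (M : PySem.Dict Int Int) (ds : List Int) : Int := ds.foldl (fun a d => a + (1 + M.getD d 0)) 0
-- every entry of m is an initial entry or satisfies its own dependency equation w.r.t. m
def EqnOK (m0 : PySem.Dict Int Int) (G : PySem.Dict Int (List Int)) (m : PySem.Dict Int Int) : Prop :=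
  ∀ k v, m.get? k = some v → m0.get? k = some v ∨
    ∃ ds, G.get? k = some ds ∧ (∀ d ∈ ds, (m.get? d).isSome = true) ∧ v = sumW m ds
-- no further node can be finalized
def Satur (graph : List (Int × List Int)) (m : PySem.Dict Int Int) : Prop :=
  ∀ kv ∈ graph, m.contains kv.1 = false → kv.2.all (fun d => m.contains d) = false
def missingOf (graph : List (Int × List Int)) (m : PySem.Dict Int Int) : List Int :=
  (graph.map Prod.fst).filter (fun k => !m.contains k)

theorem insert_fresh_preserve (d : PySem.Dict Int Int) (k : Int) (w : Int)
    (h : d.contains k = false) : DPreserve d (d.insert k w) ∧ CMono d (d.insert k w) := by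
  constructor
  · intro k' v hkv
    rw [PySem.Dict.get?_insert]
    split
    · next he =>
      exfalso
      rw [he] at hkv
      rw [PySem.Dict.contains_eq_isSome_get?, hkv] at h
      simp at h
    · exact hkv
  · intro k' hk'
    rw [PySem.Dict.contains_insert, hk']
    simp

theorem sumW_stable (m M : PySem.Dict Int Int) (ds : List Int)
    (hs : ∀ d ∈ ds, (m.get? d).isSome = true) (hp : DPreserve m M) : sumW M ds = sumW m ds := by
  unfold sumW
  rw [PySem.List.foldl_add, PySem.List.foldl_add]
  congr 2
  apply List.map_congr_left
  intro d hd
  obtain ⟨v, hv⟩ := Option.isSome_iff_exists.mp (hs d hd)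
  rw [PySem.Dict.getD_of_get?_eq_some _ _ hv, PySem.Dict.getD_of_get?_eq_some _ _ (hp d v hv)]

theorem pass_flag_true (l : List (Int × List Int)) (st : PySem.Dict Int Int × Bool)
    (h : st.2 = true) : (l.foldl bStep st).2 = true := by
  induction l generalizing st with
  | nil => simpa using h
  | cons kv l ih =>
    simp only [List.foldl_cons]
    apply ih
    unfold bStep
    split
    · rfl
    · exact h

theorem pass_mono (l : List (Int × List Int)) (st : PySem.Dict Int Int × Bool) :
    DPreserve st.1 (l.foldl bStep st).1 ∧ CMono st.1 (l.foldl bStep st).1 := by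
  induction l generalizing st with
  | nil => exact ⟨fun _ _ h => h, fun _ h => h⟩
  | cons kv l ih =>
    simp only [List.foldl_cons]
    have hstep : DPreserve st.1 (bStep st kv).1 ∧ CMono st.1 (bStep st kv).1 := by
      unfold bStep
      split
      · next hg =>
        simp only [Bool.and_eq_true, Bool.not_eq_eq_eq_not, Bool.not_true] at hg
        exact insert_fresh_preserve st.1 kv.1 _ hg.1
      · exact ⟨fun _ _ h => h, fun _ h => h⟩
    obtain ⟨ih1, ih2⟩ := ih (bStep st kv)
    exact ⟨fun k v h => ih1 k v (hstep.1 k v h), fun k h => ih2 k (hstep.2 k h)⟩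

theorem pass_false (l : List (Int × List Int)) (m : PySem.Dict Int Int)
    (h : (l.foldl bStep (m, false)).2 = false) :
    (l.foldl bStep (m, false)).1 = m ∧
    ∀ kv ∈ l, m.contains kv.1 = false → kv.2.all (fun d => m.contains d) = false := by
  induction l generalizing m with
  | nil => exact ⟨rfl, by simp⟩
  | cons kv l ih =>
    simp only [List.foldl_cons] at h ⊢
    by_cases hg : (!m.contains kv.1 && kv.2.all (fun d => m.contains d)) = true
    · exfalso
      have hone : (bStep (m, false) kv).2 = true := by unfold bStep; rw [if_pos hg]
      rw [pass_flag_true l _ hone] at h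
      exact absurd h (by simp)
    · have hb : bStep (m, false) kv = (m, false) := by unfold bStep; rw [if_neg hg]
      rw [hb] at h ⊢
      obtain ⟨h1, h2⟩ := ih m h
      refine ⟨h1, ?_⟩
      intro kv' hkv' hc
      rcases List.mem_cons.mp hkv' with h' | h'
      · subst h'
        cases hall : kv'.2.all (fun d => m.contains d) with
        | false => rfl
        | true => exact absurd (by rw [hc, hall]; rfl) hg
      · exact h2 kv' h' hc

theorem pass_eqnok (m0 : PySem.Dict Int Int) (graph : List (Int × List Int))
    (hnd : (graph.map Prod.fst).Nodup) :
    ∀ (l : List (Int × List Int)), (∀ kv ∈ l, kv ∈ graph) →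
    ∀ (st : PySem.Dict Int Int × Bool), EqnOK m0 (PySem.Dict.mk graph) st.1 →
      EqnOK m0 (PySem.Dict.mk graph) (l.foldl bStep st).1 := by
  intro l
  induction l with
  | nil => intro _ st h; exact h
  | cons kv l ih =>
    intro hsub st hst
    simp only [List.foldl_cons]
    apply ih (fun kv' h' => hsub kv' (List.mem_cons_of_mem _ h'))
    unfold bStep
    split
    · next hg =>
      simp only [Bool.and_eq_true, Bool.not_eq_eq_eq_not, Bool.not_true] at hg
      obtain ⟨hc, hall⟩ := hg
      have hpres := insert_fresh_preserve st.1 kv.1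
        (kv.2.foldl (fun a d => a + (1 + st.1.getD d 0)) 0) hc
      have hiso : ∀ d ∈ kv.2, (st.1.get? d).isSome = true := by
        intro d hd
        rw [← PySem.Dict.contains_eq_isSome_get?]
        exact List.all_eq_true.mp hall d hd
      intro k v hkv
      rw [PySem.Dict.get?_insert] at hkv
      split at hkv
      · next he =>
        subst he
        right
        refine ⟨kv.2, ?_, ?_, ?_⟩
        · apply PySem.Dict.get?_of_mem_items
          · have : kv ∈ graph := hsub kv List.mem_cons_self
            simpa using this
          · rw [PySem.Dict.keys_mk]; exact hnd
        · intro d hd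
          rw [← PySem.Dict.contains_eq_isSome_get?]
          exact hpres.2 d (by rw [PySem.Dict.contains_eq_isSome_get?]; exact hiso d hd)
        · rw [Option.some_inj] at hkv
          rw [← hkv]
          exact (sumW_stable st.1 (st.1.insert kv.1
            (kv.2.foldl (fun a d => a + (1 + st.1.getD d 0)) 0)) kv.2 hiso hpres.1).symm
      · next hne =>
        rcases hst k v hkv with h0 | ⟨ds, hds, hso, hv⟩
        · exact Or.inl h0
        · right
          refine ⟨ds, hds, ?_, ?_⟩
          · intro d hd
            obtain ⟨w, hw⟩ := Option.isSome_iff_exists.mp (hso d hd)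
            rw [hpres.1 d w hw]; rfl
          · rw [hv, sumW_stable st.1 _ ds hso hpres.1]
    · exact hst

theorem pass_changed (l : List (Int × List Int)) (m : PySem.Dict Int Int)
    (h : (l.foldl bStep (m, false)).2 = true) :
    ∃ k, k ∈ l.map Prod.fst ∧ m.contains k = false ∧
      (l.foldl bStep (m, false)).1.contains k = true := by
  induction l generalizing m with
  | nil => simp at h
  | cons kv l ih =>
    simp only [List.foldl_cons] at h ⊢
    by_cases hg : (!m.contains kv.1 && kv.2.all (fun d => m.contains d)) = true
    · have hb : bStep (m, false) kv =
          (m.insert kv.1 (kv.2.foldl (fun a d => a + (1 + m.getD d 0)) 0), true) := by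
        unfold bStep; rw [if_pos hg]
      simp only [Bool.and_eq_true, Bool.not_eq_eq_eq_not, Bool.not_true] at hg
      refine ⟨kv.1, by simp, hg.1, ?_⟩
      rw [hb]
      apply (pass_mono l (m.insert kv.1
        (kv.2.foldl (fun a d => a + (1 + m.getD d 0)) 0), true)).2
      simp [PySem.Dict.contains_insert]
    · have hb : bStep (m, false) kv = (m, false) := by unfold bStep; rw [if_neg hg]
      rw [hb] at h ⊢
      obtain ⟨k, hk1, hk2, hk3⟩ := ih m h
      exact ⟨k, by simp [hk1], hk2, hk3⟩

theorem missing_lt (graph : List (Int × List Int)) (m m' : PySem.Dict Int Int)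
    (hmono : CMono m m') (k : Int) (hk : k ∈ graph.map Prod.fst)
    (h0 : m.contains k = false) (h1 : m'.contains k = true) :
    (missingOf graph m').length < (missingOf graph m).length := by
  have hsub : (missingOf graph m').Sublist (missingOf graph m) := by
    apply List.monotone_filter_right
    intro a ha
    simp only [Bool.not_eq_eq_eq_not, Bool.not_true] at ha ⊢
    by_contra hc
    rw [hmono a (eq_true_of_ne_false hc)] at ha
    exact absurd ha (by simp)
  rcases Nat.lt_or_ge (missingOf graph m').length (missingOf graph m).length with hlt | hge
  · exact hlt
  · exfalso
    have heq := hsub.eq_of_length (Nat.le_antisymm hsub.length_le hge)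
    have hmem : k ∈ missingOf graph m := by
      unfold missingOf
      rw [List.mem_filter]
      exact ⟨hk, by rw [h0]; rfl⟩
    rw [← heq] at hmem
    unfold missingOf at hmem
    rw [List.mem_filter, h1] at hmem
    simpa using hmem.2

theorem loop_preserve (graph : List (Int × List Int)) :
    ∀ (f : Nat) (m : PySem.Dict Int Int), DPreserve m (loopGo graph f m) := by
  intro f
  induction f with
  | zero => intro m; exact fun _ _ h => h
  | succ f ih =>
    intro m
    by_cases hb : (onePass graph m).2 = true
    · have hrw : loopGo graph (f+1) m = loopGo graph f (onePass graph m).1 := by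
        simp [loopGo, hb]
      rw [hrw]
      intro k v h
      exact ih _ k v ((pass_mono graph (m, false)).1 k v h)
    · have hrw : loopGo graph (f+1) m = (onePass graph m).1 := by
        simp [loopGo, hb]
      rw [hrw]
      exact (pass_mono graph (m, false)).1

theorem loop_main (m0 : PySem.Dict Int Int) (graph : List (Int × List Int))
    (hnd : (graph.map Prod.fst).Nodup) :
    ∀ (f : Nat) (m : PySem.Dict Int Int), (missingOf graph m).length < f →
      EqnOK m0 (PySem.Dict.mk graph) m →
      EqnOK m0 (PySem.Dict.mk graph) (loopGo graph f m) ∧ Satur graph (loopGo graph f m) := by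
  intro f
  induction f with
  | zero => intro m h; omega
  | succ f ih =>
    intro m hlen hEq
    by_cases hb : (onePass graph m).2 = true
    · have hrw : loopGo graph (f+1) m = loopGo graph f (onePass graph m).1 := by
        simp [loopGo, hb]
      rw [hrw]
      obtain ⟨k, hk1, hk2, hk3⟩ := pass_changed graph m hb
      have hmono : CMono m (onePass graph m).1 := (pass_mono graph (m, false)).2
      have hlt := missing_lt graph m (onePass graph m).1 hmono k hk1 hk2 hk3
      apply ih
      · omega
      · exact pass_eqnok m0 graph hnd graph (fun _ h => h) (m, false) hEq
    · have hb' : (onePass graph m).2 = false := by simpa using hb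
      have hrw : loopGo graph (f+1) m = (onePass graph m).1 := by
        simp [loopGo, hb]
      rw [hrw]
      obtain ⟨h1, h2⟩ := pass_false graph m hb'
      have h1' : (onePass graph m).1 = m := h1
      rw [h1']
      exact ⟨hEq, h2⟩

-- ---- A-side ----

theorem dfsGo_cmono (G : PySem.Dict Int (List Int)) :
    ∀ (f : Nat),
      (∀ t m v m', dfsGo G f t m = some (v, m') → CMono m m') ∧
      (∀ ds c m out, goDeps G f ds c m = some out → CMono m out.2) := by
  intro f
  induction f with
  | zero =>
    constructor
    · intro t m v m' h; simp [dfsGo] at h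
    · intro ds c m out h
      cases ds with
      | nil =>
        simp only [goDeps, Option.some_inj, Prod.mk.injEq] at h
        subst h; exact fun _ hh => hh
      | cons d ds => simp [goDeps, dfsGo] at h
  | succ f ih =>
    have hd : ∀ t m v m', dfsGo G (f+1) t m = some (v, m') → CMono m m' := by
      intro t m v m' h
      simp only [dfsGo] at h
      cases hm : m.get? t with
      | some v0 =>
        simp only [hm, Option.some_inj, Prod.mk.injEq] at h
        rw [← h.2]; exact fun _ hh => hh
      | none =>
        simp only [hm] at h
        cases hg : G.get? t with
        | none => simp [hg] at h
        | some ds =>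
          simp only [hg] at h
          cases hgd : goDeps G f ds 0 m with
          | none => simp [hgd] at h
          | some cm =>
            simp only [hgd, Option.some_inj, Prod.mk.injEq] at h
            rw [← h.2]
            intro k hk
            rw [PySem.Dict.contains_insert, ih.2 ds 0 m cm hgd k hk]
            simp
    refine ⟨hd, ?_⟩
    intro ds
    induction ds with
    | nil =>
      intro c m out h
      simp only [goDeps, Option.some_inj, Prod.mk.injEq] at h
      subst h; exact fun _ hh => hh
    | cons d ds ihl =>
      intro c m out h
      simp only [goDeps] at h
      cases hv : dfsGo G (f+1) d m with
      | none => simp [hv] at h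
      | some vm =>
        simp only [hv] at h
        intro k hk
        exact ihl _ _ _ h k (hd d m vm.1 vm.2 (by rw [hv]) k hk)

-- the simulation: whatever A's recursion returns is B's fixed-point value at that node
theorem dfsGo_val (m0 : PySem.Dict Int Int) (graph : List (Int × List Int))
    (M : PySem.Dict Int Int) (hEq : EqnOK m0 (PySem.Dict.mk graph) M) (hSat : Satur graph M)
    (hnd : (graph.map Prod.fst).Nodup) :
    ∀ (f : Nat),
      (∀ t m v m', DPreserve m M → CMono m0 m → dfsGo (PySem.Dict.mk graph) f t m = some (v, m') →
        M.get? t = some v ∧ DPreserve m' M ∧ CMono m0 m') ∧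
      (∀ ds c m out, DPreserve m M → CMono m0 m → goDeps (PySem.Dict.mk graph) f ds c m = some out →
        (∀ d ∈ ds, (M.get? d).isSome = true) ∧
        out.1 = ds.foldl (fun a d => a + (1 + M.getD d 0)) c ∧ DPreserve out.2 M ∧ CMono m0 out.2) := by
  intro f
  induction f with
  | zero =>
    constructor
    · intro t m v m' _ _ h; simp [dfsGo] at h
    · intro ds c m out hP hC h
      cases ds with
      | nil =>
        simp only [goDeps, Option.some_inj, Prod.mk.injEq] at h
        subst h
        exact ⟨by simp, by simp, hP, hC⟩
      | cons d ds => simp [goDeps, dfsGo] at h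
  | succ f ih =>
    have hd : ∀ t m v m', DPreserve m M → CMono m0 m →
        dfsGo (PySem.Dict.mk graph) (f+1) t m = some (v, m') →
        M.get? t = some v ∧ DPreserve m' M ∧ CMono m0 m' := by
      intro t m v m' hP hC h
      simp only [dfsGo] at h
      cases hm : m.get? t with
      | some v0 =>
        simp only [hm, Option.some_inj, Prod.mk.injEq] at h
        refine ⟨by rw [← h.1]; exact hP t v0 hm, by rw [← h.2]; exact hP, by rw [← h.2]; exact hC⟩
      | none =>
        simp only [hm] at h
        cases hg : (PySem.Dict.mk graph).get? t with
        | none => simp [hg] at h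
        | some ds =>
          simp only [hg] at h
          cases hgd : goDeps (PySem.Dict.mk graph) f ds 0 m with
          | none => simp [hgd] at h
          | some cm =>
            simp only [hgd, Option.some_inj, Prod.mk.injEq] at h
            obtain ⟨hso, hcval, hPc, hCc⟩ := ih.2 ds 0 m cm hP hC hgd
            have hsum : cm.1 = sumW M ds := hcval
            have hMt : M.get? t = some cm.1 := by
              have hm0t : m0.contains t = false := by
                by_contra hcn
                have hct := hC t (eq_true_of_ne_false hcn)
                rw [PySem.Dict.contains_eq_isSome_get?, hm] at hct
                simpa using hct
              cases hMt? : M.get? t with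
              | some w =>
                rcases hEq t w hMt? with h0 | ⟨ds', hds', _, hw⟩
                · exfalso
                  rw [PySem.Dict.contains_eq_isSome_get?, h0] at hm0t
                  simpa using hm0t
                · rw [hds', Option.some_inj] at hg
                  subst hg
                  rw [hw, ← hsum]
              | none =>
                exfalso
                have htg : (t, ds) ∈ graph := by
                  have := PySem.Dict.mem_items_of_get?_eq_some _ hg
                  simpa using this
                have hsat := hSat (t, ds) htg
                  (by rw [PySem.Dict.contains_eq_isSome_get?, hMt?]; rfl)
                have hallM : ds.all (fun d => M.contains d) = true := by
                  rw [List.all_eq_true]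
                  intro d hdm
                  rw [PySem.Dict.contains_eq_isSome_get?]
                  exact hso d hdm
                rw [hallM] at hsat
                exact absurd hsat (by simp)
            refine ⟨by rw [← h.1]; exact hMt, ?_, ?_⟩
            · rw [← h.2]
              intro k w hk
              rw [PySem.Dict.get?_insert] at hk
              split at hk
              · next he =>
                subst he
                rw [Option.some_inj] at hk
                rw [← hk]
                exact hMt
              · exact hPc k w hk
            · rw [← h.2]
              intro k hk
              rw [PySem.Dict.contains_insert, hCc k hk]
              simp
    refine ⟨hd, ?_⟩
    intro ds
    induction ds with
    | nil =>
      intro c m out hP hC h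
      simp only [goDeps, Option.some_inj, Prod.mk.injEq] at h
      subst h
      exact ⟨by simp, by simp, hP, hC⟩
    | cons d ds ihl =>
      intro c m out hP hC h
      simp only [goDeps] at h
      cases hv : dfsGo (PySem.Dict.mk graph) (f+1) d m with
      | none => simp [hv] at h
      | some vm =>
        simp only [hv] at h
        obtain ⟨hMd, hPd, hCd⟩ := hd d m vm.1 vm.2 hP hC (by rw [hv])
        obtain ⟨hso, hval, hPo, hCo⟩ := ihl (c + (1 + vm.1)) vm.2 out hPd hCd h
        refine ⟨?_, ?_, hPo, hCo⟩
        · intro d' hd'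
          rcases List.mem_cons.mp hd' with h' | h'
          · rw [h', hMd]; rfl
          · exact hso d' h'
        · simp only [List.foldl_cons]
          rw [hval, PySem.Dict.getD_of_get?_eq_some _ _ hMd]

theorem foldl_max_le {α : Type} (f : α → Nat) (B : Nat) :
    ∀ (xs : List α) (a : Nat), a ≤ B → (∀ x ∈ xs, f x ≤ B) →
      xs.foldl (fun acc x => max acc (f x)) a ≤ B := by
  intro xs
  induction xs with
  | nil => intro a ha _; simpa using ha
  | cons x xs ih =>
    intro a ha hx
    simp only [List.foldl_cons]
    apply ih
    · exact Nat.max_le.mpr ⟨ha, hx x List.mem_cons_self⟩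
    · intro y hy; exact hx y (List.mem_cons_of_mem _ hy)

theorem height_le (mD : PySem.Dict Int Int) (gD : PySem.Dict Int (List Int)) :
    ∀ (k : Nat) (y : Int), heightAt mD gD k y ≤ k := by
  intro k
  induction k with
  | zero => intro y; simp [heightAt]
  | succ k ih =>
    intro y
    simp only [heightAt]
    split
    · omega
    · cases hg : gD.get? y with
      | none => simp
      | some ds =>
        simp only [hg]
        apply foldl_max_le
        · omega
        · intro d _
          have := ih d
          omega

-- success: under Pre_'s closure/acyclicity data the fuelled recursion returns
theorem dfsGo_some (m0 : PySem.Dict Int Int) (graph : List (Int × List Int))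
    (R : List Int)
    (hclosed : ∀ y ∈ R, ∀ d ∈ activeSuccs m0 (PySem.Dict.mk graph) y, d ∈ R)
    (hent : ∀ y ∈ R, m0.contains y = false → ((PySem.Dict.mk graph).get? y).isSome = true)
    (hstab : ∀ y ∈ R, heightAt m0 (PySem.Dict.mk graph) graph.length y =
        heightAt m0 (PySem.Dict.mk graph) (graph.length + 1) y) :
    ∀ (f : Nat),
      (∀ t m, t ∈ R → heightAt m0 (PySem.Dict.mk graph) graph.length t < f → CMono m0 m →
        (dfsGo (PySem.Dict.mk graph) f t m).isSome = true) ∧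
      (∀ ds c m, (∀ d ∈ ds, d ∈ R ∧ heightAt m0 (PySem.Dict.mk graph) graph.length d < f) →
        CMono m0 m → (goDeps (PySem.Dict.mk graph) f ds c m).isSome = true) := by
  intro f
  induction f with
  | zero =>
    constructor
    · intro t m _ hh _; omega
    · intro ds c m hds _
      cases ds with
      | nil => simp [goDeps]
      | cons d dds => exact absurd (hds d List.mem_cons_self).2 (by omega)
  | succ f ih =>
    have hd : ∀ t m, t ∈ R → heightAt m0 (PySem.Dict.mk graph) graph.length t < f + 1 →
        CMono m0 m → (dfsGo (PySem.Dict.mk graph) (f+1) t m).isSome = true := by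
      intro t m htR hht hC
      simp only [dfsGo]
      cases hm : m.get? t with
      | some v0 => simp [hm]
      | none =>
        simp only [hm]
        have hm0t : m0.contains t = false := by
          by_contra hcn
          have hct := hC t (eq_true_of_ne_false hcn)
          rw [PySem.Dict.contains_eq_isSome_get?, hm] at hct
          simpa using hct
        obtain ⟨ds, hg⟩ := Option.isSome_iff_exists.mp (hent t htR hm0t)
        simp only [hg]
        have hsucc : activeSuccs m0 (PySem.Dict.mk graph) t = ds := by
          simp [activeSuccs, hm0t, hg]
        have hdep : ∀ d ∈ ds, d ∈ R ∧
            heightAt m0 (PySem.Dict.mk graph) graph.length d < f := by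
          intro d hdm
          refine ⟨hclosed t htR d (by rw [hsucc]; exact hdm), ?_⟩
          have hunf : heightAt m0 (PySem.Dict.mk graph) (graph.length + 1) t =
              ds.foldl (fun a d => max a (1 + heightAt m0 (PySem.Dict.mk graph) graph.length d)) 0 := by
            simp [heightAt, hm0t, hg]
          have hstep := (PySem.List.le_foldl_max_nat ds
            (fun d => 1 + heightAt m0 (PySem.Dict.mk graph) graph.length d) 0).2 d hdm
          rw [← hunf, ← hstab t htR] at hstep
          omega
        cases hgd : goDeps (PySem.Dict.mk graph) f ds 0 m with
        | none =>
          exfalso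
          have hsome := ih.2 ds 0 m hdep hC
          rw [hgd] at hsome
          simpa using hsome
        | some cm => simp [hgd]
    refine ⟨hd, ?_⟩
    intro ds
    induction ds with
    | nil => intro c m _ _; simp [goDeps]
    | cons d dds ihl =>
      intro c m hds hC
      simp only [goDeps]
      cases hv : dfsGo (PySem.Dict.mk graph) (f+1) d m with
      | none =>
        exfalso
        have hsome := hd d m (hds d List.mem_cons_self).1 (hds d List.mem_cons_self).2 hC
        rw [hv] at hsome
        simpa using hsome
      | some vm =>
        simp only [hv]
        have hCd : CMono m0 vm.2 := by
          intro k hk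
          exact (dfsGo_cmono (PySem.Dict.mk graph) (f+1)).1 d m vm.1 vm.2 (by rw [hv]) k (hC k hk)
        exact ihl (c + (1 + vm.1)) vm.2 (fun d' hd' => hds d' (List.mem_cons_of_mem _ hd')) hCd

-- ===== VERDICT (by name: the statement is the Claim_ definition above) =====
theorem dfs_spec : Claim_equal_dfs := by
  intro task memo graph hdom hpre
  unfold Spec_dfs
  have hDP0 : DPreserve (PySem.Dict.mk memo)
      (loopGo graph (graph.length + 1) (PySem.Dict.mk memo)) := loop_preserve graph _ _
  rcases hpre with hc | ⟨hnd, htR, hclosed, hent, hstab⟩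
  · -- task already memoised: both return memo[task]
    obtain ⟨v0, hv0⟩ : ∃ v0, (PySem.Dict.mk memo).get? task = some v0 := by
      rw [PySem.Dict.contains_eq_isSome_get?] at hc
      exact Option.isSome_iff_exists.mp hc
    have hA : dfs task memo graph = v0 := by
      unfold dfs
      simp only [dfsGo, hv0]
    have hB : dfs_alt task memo graph = v0 := by
      unfold dfs_alt
      rw [hDP0 task v0 hv0]
      rfl
    rw [hA, hB]
  · have hEq0 : EqnOK (PySem.Dict.mk memo) (PySem.Dict.mk graph) (PySem.Dict.mk memo) :=
      fun _ _ h => Or.inl h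
    have hmiss : (missingOf graph (PySem.Dict.mk memo)).length < graph.length + 1 := by
      have h1 := List.length_filter_le (fun k => !(PySem.Dict.mk memo).contains k)
        (graph.map Prod.fst)
      have h2 : (graph.map Prod.fst).length = graph.length := List.length_map _
      unfold missingOf
      omega
    obtain ⟨hEqM, hSatM⟩ := loop_main (PySem.Dict.mk memo) graph hnd _ _ hmiss hEq0
    have hsome := (dfsGo_some (PySem.Dict.mk memo) graph (preReach task memo graph)
        hclosed hent hstab (graph.length + 1)).1 task (PySem.Dict.mk memo) htR
        (by have := height_le (PySem.Dict.mk memo) (PySem.Dict.mk graph) graph.length task; omega)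
        (fun _ h => h)
    obtain ⟨vm, hrun⟩ := Option.isSome_iff_exists.mp hsome
    have hval := ((dfsGo_val (PySem.Dict.mk memo) graph _ hEqM hSatM hnd (graph.length + 1)).1
        task (PySem.Dict.mk memo) vm.1 vm.2 hDP0 (fun _ h => h) (by rw [hrun])).1
    have hA : dfs task memo graph = vm.1 := by
      unfold dfs
      rw [hrun]
    have hB : dfs_alt task memo graph = vm.1 := by
      unfold dfs_alt
      rw [hval]
      rfl
    rw [hA, hB]
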